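-- pv_equiv track=rewrite | github.com/MendozaLab/erdos-experiments | Erdos30/paper/spectral_universality_test.py | greedy_sidon
-- ===== SOURCE A (Python) =====
-- def greedy_sidon(N, target_k=None):
--     """Build a greedy Sidon set in Z_N."""
--     A = [0]
--     sums = {0}
--     for x in range(1, N):
--         new_sums = []
--         conflict = False
--         for a in A:
--             s = x + a
--             if s in sums:
--                 conflict = True
--                 break
--             new_sums.append(s)
--         if not conflict:
--             s_xx = x + x
--             if s_xx in sums:
--                 continue
--             new_sums.append(s_xx)
--             for s in new_sums:
--                 sums.add(s)
--             A.append(x)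
--             if target_k and len(A) >= target_k:
--                 break
--     return A
-- ===== SOURCE B (Python) =====
-- def greedy_sidon(N, target_k=None):
--     """Build a greedy Sidon set in Z_N, via a table of pairwise differences.
--
--     x conflicts iff some difference x - a is already a pairwise difference of
--     A; used[d] records whether d is one (all differences lie below len(used))."""
--     A = [0]
--     used = [True]
--     for x in range(1, N):
--         if any(x - a < len(used) and used[x - a] for a in reversed(A)):
--             continue
--         used.extend([False] * (x + 1 - len(used)))
--         for a in A:
--             used[x - a] = True
--         A.append(x)
--         if target_k and len(A) >= target_k:
--             break
--     return A
-- ===== Notes on version B (the rewrite author's own statement) =====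
-- stated objective: alternative
-- what changed: B replaces A's running sum-set by a boolean table indexed by pairwise difference (the difference characterization of Sidon sets): a candidate x is rejected iff some x - a is already a marked difference, eliminating A's new_sums buffer and its separate x+x branch.
import Mathlib
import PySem

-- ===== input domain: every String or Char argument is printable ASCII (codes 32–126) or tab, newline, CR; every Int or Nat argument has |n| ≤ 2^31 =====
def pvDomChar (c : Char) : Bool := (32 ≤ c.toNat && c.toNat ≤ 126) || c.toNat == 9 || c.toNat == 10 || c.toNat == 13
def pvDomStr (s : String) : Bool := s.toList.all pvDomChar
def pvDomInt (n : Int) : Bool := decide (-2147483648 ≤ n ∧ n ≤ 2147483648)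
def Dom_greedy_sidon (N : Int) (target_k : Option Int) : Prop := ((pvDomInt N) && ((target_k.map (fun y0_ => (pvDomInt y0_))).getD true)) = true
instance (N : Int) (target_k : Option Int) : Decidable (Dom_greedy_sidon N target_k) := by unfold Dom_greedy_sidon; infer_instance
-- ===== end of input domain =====

-- B replaces A's running sum-set by a boolean table indexed by pairwise difference (the
-- difference characterization of Sidon sets), removing A's separate x+x branch and
-- new_sums buffer; objective: alternative (a different data structure, similar cost).


-- `if target_k and len(A) >= target_k:` — truthiness of the optional int, shared by both ports
def pvTargetReached (target_k : Option Int) (len : Nat) : Bool :=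
  match target_k with
  | none => false
  | some k => k != 0 && (k ≤ (len : Int))

-- ===== PORT A =====
-- inner `for a in A:` loop: builds new_sums, `none` = conflict (break)
def pvAInner (sums : PySem.Set Int) (x : Int) : List Int → List Int → Option (List Int)
  | [], new_sums => some new_sums
  | a :: rest, new_sums =>
    let s := x + a
    if PySem.Set.contains sums s then none
    else pvAInner sums x rest (new_sums ++ [s])

-- outer `for x in range(1, N):` loop with the target_k break
-- (Python's range is LAZY and target_k can break out long before N: the loop
-- counts x upward instead of materializing the range list — exact same iterates)
def pvALoop (target_k : Option Int) (N x : Int) (A : List Int) (sums : PySem.Set Int) : List Int :=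
  if _hx : x < N then
    match pvAInner sums x A [] with
    | none => pvALoop target_k N (x + 1) A sums
    | some new_sums =>
      let s_xx := x + x
      if PySem.Set.contains sums s_xx then pvALoop target_k N (x + 1) A sums
      else
        let new_sums' := new_sums ++ [s_xx]
        let sums' := new_sums'.foldl PySem.Set.add sums
        let A' := A ++ [x]
        if pvTargetReached target_k A'.length then A'
        else pvALoop target_k N (x + 1) A' sums'
  else A
termination_by (N - x).toNat
decreasing_by all_goals omega

def greedy_sidon (N : Int) (target_k : Option Int) : List Int :=
  pvALoop target_k N 1 [0] (PySem.Set.ofList [0])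

-- ===== PORT B =====
def pvBLoop (target_k : Option Int) (N x : Int) (A : List Int) (used : Array Bool) : List Int :=
  if _hx : x < N then
    if A.reverse.any (fun a =>
        decide (x - a < (used.size : Int)) && used.getD (x - a).toNat false) then
      pvBLoop target_k N (x + 1) A used
    else
      let used1 := used ++ Array.replicate (x + 1 - (used.size : Int)).toNat false
      let used2 := A.foldl (fun u a => u.setIfInBounds (x - a).toNat true) used1
      let A' := A ++ [x]
      if pvTargetReached target_k A'.length then A'
      else pvBLoop target_k N (x + 1) A' used2
  else A
termination_by (N - x).toNat
decreasing_by all_goals omega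

def greedy_sidon_alt (N : Int) (target_k : Option Int) : List Int :=
  pvBLoop target_k N 1 [0] #[true]

-- ===== PRECONDITION & SPEC =====
def Spec_greedy_sidon (N : Int) (target_k : Option Int) (out : List Int) : Prop := out = greedy_sidon_alt N target_k
instance (N : Int) (target_k : Option Int) (out : List Int) : Decidable (Spec_greedy_sidon N target_k out) := by unfold Spec_greedy_sidon; infer_instance

-- ===== CLAIM (what is proved, stated in full; the proofs are below) =====
def Claim_equal_greedy_sidon : Prop := ∀ (N : Int) (target_k : Option Int), Dom_greedy_sidon N target_k → Spec_greedy_sidon N target_k (greedy_sidon N target_k)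

-- ===== LEMMAS AND PROOFS =====

-- A's `sums` holds exactly the pairwise sums of A
def pvSumInv (A : List Int) (S : PySem.Set Int) : Prop :=
  ∀ s : Int, s ∈ S ↔ ∃ a ∈ A, ∃ b ∈ A, s = a + b
-- v is a pairwise difference of A (one sign suffices: A is built in increasing order)
def pvIsDiff (A : List Int) (v : Int) : Prop := ∃ a ∈ A, ∃ b ∈ A, b ≤ a ∧ v = a - b

-- B's boolean table reads true exactly on the pairwise differences of A
def pvDiffInv (A : List Int) (used : Array Bool) : Prop :=
  ∀ d : Nat, used.getD d false = true ↔ pvIsDiff A (d : Int)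

lemma pvAInner_none_iff (S : PySem.Set Int) (x : Int) (A acc : List Int) :
    pvAInner S x A acc = none ↔ ∃ a ∈ A, x + a ∈ S := by
  induction A generalizing acc with
  | nil => simp [pvAInner]
  | cons a rest ih =>
    simp only [pvAInner]
    by_cases h : x + a ∈ S
    · rw [if_pos ((PySem.Set.contains_iff S (x + a)).2 h)]
      simp [h]
    · rw [if_neg (fun hh => h ((PySem.Set.contains_iff S (x + a)).1 hh)), ih]
      simp [h]

lemma pvAInner_some (S : PySem.Set Int) (x : Int) (A : List Int) :
    ∀ (acc ns : List Int), pvAInner S x A acc = some ns → ns = acc ++ A.map (fun a => x + a) := by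
  induction A with
  | nil => intro acc ns h; simp [pvAInner] at h; simp [h.symm]
  | cons a rest ih =>
    intro acc ns h
    simp only [pvAInner] at h
    by_cases hc : x + a ∈ S
    · rw [if_pos ((PySem.Set.contains_iff S (x + a)).2 hc)] at h
      exact absurd h (by simp)
    · rw [if_neg (fun hh => hc ((PySem.Set.contains_iff S (x + a)).1 hh))] at h
      have := ih (acc ++ [x + a]) ns h
      simp [this]

-- the two conflict tests agree (difference characterization of a sum conflict)
lemma pvConflict_iff (A : List Int) (S : PySem.Set Int) (x : Int)
    (hS : pvSumInv A S) (hbx : ∀ a ∈ A, a < x) :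
    (∃ a ∈ A, x + a ∈ S) ↔ (∃ a ∈ A, pvIsDiff A (x - a)) := by
  constructor
  · rintro ⟨a, ha, hc⟩
    rw [hS] at hc
    obtain ⟨b, hb, c, hc', heq⟩ := hc
    have hax := hbx a ha
    by_cases hca : a ≤ c
    · exact ⟨b, hb, c, hc', a, ha, hca, by omega⟩
    · exact ⟨c, hc', b, hb, a, ha, by omega, by omega⟩
  · rintro ⟨a, ha, b, hb, c, hc', hle, heq⟩
    exact ⟨c, hc', by rw [hS]; exact ⟨a, ha, b, hb, by omega⟩⟩

-- with every element of A below x, x+x can never already be a pairwise sum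
lemma pvSxx_not_mem (A : List Int) (S : PySem.Set Int) (x : Int)
    (hS : pvSumInv A S) (hbx : ∀ a ∈ A, a < x) :
    PySem.Set.contains S (x + x) = false := by
  rw [← Bool.not_eq_true, PySem.Set.contains_iff, hS]
  rintro ⟨a, ha, b, hb, heq⟩
  have := hbx a ha; have := hbx b hb; omega

lemma pvSumInv_step (A : List Int) (S : PySem.Set Int) (x : Int) (hS : pvSumInv A S) :
    pvSumInv (A ++ [x]) ((A.map (fun a => x + a) ++ [x + x]).foldl PySem.Set.add S) := by
  intro s
  have hm : s ∈ (A.map (fun a => x + a) ++ [x + x]).foldl PySem.Set.add S ↔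
      s ∈ S ∨ ∃ b ∈ A.map (fun a => x + a) ++ [x + x], s = b := by
    simpa using PySem.Set.mem_foldl_add (l := A.map (fun a => x + a) ++ [x + x]) (f := id)
      (s := S) (y := s)
  rw [hm, hS]
  simp only [List.mem_append, List.mem_map, List.mem_singleton]
  constructor
  · rintro (⟨a, ha, b, hb, rfl⟩ | ⟨b, ⟨a, ha, rfl⟩ | rfl, rfl⟩)
    · exact ⟨a, Or.inl ha, b, Or.inl hb, rfl⟩
    · exact ⟨x, Or.inr rfl, a, Or.inl ha, rfl⟩
    · exact ⟨x, Or.inr rfl, x, Or.inr rfl, rfl⟩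
  · rintro ⟨a, ha | ha, b, hb | hb, rfl⟩
    · exact Or.inl ⟨a, ha, b, hb, rfl⟩
    · exact Or.inr ⟨x + a, Or.inl ⟨a, ha, rfl⟩, by omega⟩
    · exact Or.inr ⟨x + b, Or.inl ⟨b, hb, rfl⟩, by omega⟩
    · exact Or.inr ⟨x + x, Or.inr rfl, by omega⟩

lemma pvGetD_lt (u : Array Bool) (i : Nat) (h : i < u.size) : u.getD i false = u[i] := by
  simp [Array.getD, h]

lemma pvGetD_ge (u : Array Bool) (i : Nat) (h : u.size ≤ i) : u.getD i false = false := by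
  simp [Array.getD]; omega

-- extending the table with `false` entries changes no read (out of range reads false)
lemma pvGetD_append_replicate (u : Array Bool) (g i : Nat) :
    (u ++ Array.replicate g false).getD i false = u.getD i false := by
  have hs : (u ++ Array.replicate g false).size = u.size + g := by simp
  by_cases h : i < u.size
  · rw [pvGetD_lt _ _ (by omega), pvGetD_lt _ _ h]
    exact Array.getElem_append_left h
  · have hr : u.getD i false = false := pvGetD_ge _ _ (by omega)
    rw [hr]
    by_cases h2 : i < u.size + g
    · rw [pvGetD_lt _ _ (by omega)]
      rw [Array.getElem_append_right (by omega)]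
      exact Array.getElem_replicate ..
    · exact pvGetD_ge _ _ (by omega)

lemma pvGetD_set (u : Array Bool) (i j : Nat) :
    ((u.setIfInBounds i true).getD j false = true) ↔
      (u.getD j false = true ∨ (j = i ∧ i < u.size)) := by
  by_cases hin : i < u.size
  · by_cases hji : j = i
    · subst hji
      rw [pvGetD_lt _ _ (by simpa using hin)]
      simp [hin]
    · constructor
      · intro h
        refine Or.inl ?_
        by_cases hj : j < u.size
        · rw [pvGetD_lt _ _ (by simpa using hj)] at h
          rw [pvGetD_lt _ _ hj]
          rw [Array.getElem_setIfInBounds] at h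
          simpa [Ne.symm hji] using h
        · rw [pvGetD_ge _ _ (by simpa using (by omega : u.size ≤ j))] at h
          exact absurd h (by simp)
      · rintro (h | ⟨rfl, _⟩)
        · by_cases hj : j < u.size
          · rw [pvGetD_lt _ _ hj] at h
            rw [pvGetD_lt _ _ (by simpa using hj), Array.getElem_setIfInBounds]
            simpa [Ne.symm hji] using h
          · rw [pvGetD_ge _ _ (by omega)] at h
            exact absurd h (by simp)
        · exact absurd rfl hji
  · rw [Array.setIfInBounds]
    rw [dif_neg hin]
    constructor
    · exact Or.inl
    · rintro (h | ⟨rfl, h⟩)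
      · exact h
      · omega

lemma pvSize_foldl_set (x : Int) (l : List Int) :
    ∀ (u : Array Bool),
      (l.foldl (fun u a => u.setIfInBounds (x - a).toNat true) u).size = u.size := by
  induction l with
  | nil => intro u; rfl
  | cons a l ih => intro u; rw [List.foldl_cons, ih, Array.size_setIfInBounds]

lemma pvGetD_foldl_set (x : Int) (l : List Int) :
    ∀ (u : Array Bool) (d : Nat),
      ((l.foldl (fun u a => u.setIfInBounds (x - a).toNat true) u).getD d false = true) ↔
      (u.getD d false = true ∨ ∃ a ∈ l, d = (x - a).toNat ∧ (x - a).toNat < u.size) := by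
  induction l with
  | nil => simp
  | cons a l ih =>
    intro u d
    rw [List.foldl_cons, ih, pvGetD_set]
    simp only [Array.size_setIfInBounds, List.mem_cons]
    constructor
    · rintro ((h | h) | ⟨b, hb, hd⟩)
      · exact Or.inl h
      · exact Or.inr ⟨a, Or.inl rfl, h⟩
      · exact Or.inr ⟨b, Or.inr hb, hd⟩
    · rintro (h | ⟨b, (rfl | hb), hd⟩)
      · exact Or.inl (Or.inl h)
      · exact Or.inl (Or.inr hd)
      · exact Or.inr ⟨b, hb, hd⟩

-- B's per-element probe reads exactly "x - a is a pairwise difference"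
lemma pvGuard_iff (A : List Int) (used : Array Bool) (x a : Int)
    (hD : pvDiffInv A used) (_h0 : 0 ≤ a) (hax : a < x) :
    ((decide (x - a < (used.size : Int)) && used.getD (x - a).toNat false) = true) ↔
      pvIsDiff A (x - a) := by
  have hnn : ((x - a).toNat : Int) = x - a := by omega
  by_cases h : x - a < (used.size : Int)
  · simp only [h, decide_true, Bool.true_and]
    rw [hD, hnn]
  · simp only [h, decide_false, Bool.false_and]
    refine ⟨fun hff => absurd hff (by simp), fun hpv => ?_⟩
    have hge : used.size ≤ (x - a).toNat := by omega
    have := (hD (x - a).toNat).2 (by rwa [hnn])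
    rw [pvGetD_ge _ _ hge] at this
    exact this

lemma pvDiffInv_step (A : List Int) (used : Array Bool) (x : Int)
    (hD : pvDiffInv A used) (hne : A ≠ []) (hbx : ∀ a ∈ A, a < x)
    (hpos : ∀ a ∈ A, 0 ≤ a) (hsz : (used.size : Int) ≤ x) :
    pvDiffInv (A ++ [x])
      (A.foldl (fun u a => u.setIfInBounds (x - a).toNat true)
        (used ++ Array.replicate (x + 1 - (used.size : Int)).toNat false)) := by
  intro d
  obtain ⟨a0, ha0⟩ := List.exists_mem_of_ne_nil A hne
  have hsz1 : ((used ++ Array.replicate (x + 1 - (used.size : Int)).toNat false).size : Int)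
      = x + 1 := by
    simp [Array.size_append]; omega
  rw [pvGetD_foldl_set, pvGetD_append_replicate, hD d]
  constructor
  · rintro (h | ⟨a, ha, rfl, _⟩)
    · obtain ⟨p, hp, q, hq, hle, heq⟩ := h
      exact ⟨p, List.mem_append_left _ hp, q, List.mem_append_left _ hq, hle, heq⟩
    · have hxa : ((x - a).toNat : Int) = x - a := by have := hbx a ha; omega
      exact ⟨x, List.mem_append_right _ (by simp), a, List.mem_append_left _ ha,
        le_of_lt (hbx a ha), hxa⟩
  · rintro ⟨p, hp, q, hq, hle, heq⟩
    rcases List.mem_append.1 hp with hp' | hp' <;> rcases List.mem_append.1 hq with hq' | hq'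
    · exact Or.inl ⟨p, hp', q, hq', hle, heq⟩
    · have : q = x := by simpa using hq'
      have := hbx p hp'
      exact Or.inl ⟨a0, ha0, a0, ha0, le_refl _, by omega⟩
    · have hpx : p = x := by simpa using hp'
      subst hpx
      have hq0 := hpos q hq'
      have hqx := hbx q hq'
      exact Or.inr ⟨q, hq', by omega, by omega⟩
    · have hpx : p = x := by simpa using hp'
      have hqx : q = x := by simpa using hq'
      exact Or.inl ⟨a0, ha0, a0, ha0, le_refl _, by omega⟩

lemma pvLoop_eq (target_k : Option Int) (N : Int) (n : Nat) :
    ∀ (x : Int) (A : List Int) (S : PySem.Set Int) (used : Array Bool),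
      (N - x).toNat = n →
      A ≠ [] → pvSumInv A S → pvDiffInv A used →
      (∀ a ∈ A, 0 ≤ a ∧ a < x) → (used.size : Int) ≤ x →
      pvALoop target_k N x A S = pvBLoop target_k N x A used := by
  induction n with
  | zero =>
    intro x A S used hn _ _ _ _ _
    rw [pvALoop, pvBLoop]
    rw [dif_neg (by omega), dif_neg (by omega)]
  | succ n ih =>
    intro x A S used hn hne hS hD hbx hsz
    rw [pvALoop, pvBLoop]
    rw [dif_pos (by omega), dif_pos (by omega)]
    have hbx' : ∀ a ∈ A, a < x := fun a ha => (hbx a ha).2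
    have hconf : (∃ a ∈ A, x + a ∈ S) ↔
        (A.reverse.any (fun a =>
          decide (x - a < (used.size : Int)) && used.getD (x - a).toNat false) = true) := by
      rw [pvConflict_iff A S x hS hbx']
      simp only [List.any_eq_true, List.mem_reverse]
      constructor
      · rintro ⟨a, ha, hpv⟩
        exact ⟨a, ha, (pvGuard_iff A used x a hD (hbx a ha).1 (hbx a ha).2).2 hpv⟩
      · rintro ⟨a, ha, hg⟩
        exact ⟨a, ha, (pvGuard_iff A used x a hD (hbx a ha).1 (hbx a ha).2).1 hg⟩
    have hbx1 : ∀ a ∈ A, 0 ≤ a ∧ a < x + 1 := fun a ha => by have := hbx a ha; omega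
    by_cases hc : ∃ a ∈ A, x + a ∈ S
    · rw [(pvAInner_none_iff S x A []).2 hc, if_pos (hconf.1 hc)]
      exact ih (x + 1) A S used (by omega) hne hS hD hbx1 (by omega)
    · rw [if_neg (fun h => hc (hconf.2 h))]
      obtain ⟨ns, hns⟩ : ∃ ns, pvAInner S x A [] = some ns := by
        cases h : pvAInner S x A [] with
        | none => exact absurd ((pvAInner_none_iff S x A []).1 h) hc
        | some ns => exact ⟨ns, rfl⟩
      have hns' := pvAInner_some S x A [] ns hns
      rw [hns]
      simp only [pvSxx_not_mem A S x hS hbx', Bool.false_eq_true, if_false, hns']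
      have hbxx : ∀ a ∈ A ++ [x], 0 ≤ a ∧ a < x + 1 := by
        intro a ha
        rcases List.mem_append.1 ha with h | h
        · exact hbx1 a h
        · simp at h; omega
      have hsz2 : ((A.foldl (fun u a => u.setIfInBounds (x - a).toNat true)
          (used ++ Array.replicate (x + 1 - (used.size : Int)).toNat false)).size : Int)
          ≤ x + 1 := by
        rw [pvSize_foldl_set]
        simp [Array.size_append]; omega
      by_cases ht : pvTargetReached target_k (A.length + 1) = true
      · simp [ht]
      · simp only [List.length_append, List.length_singleton, ht, Bool.false_eq_true, if_false,
          List.nil_append]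
        exact ih (x + 1) (A ++ [x]) _ _ (by omega) (by simp)
          (by simpa using pvSumInv_step A S x hS)
          (pvDiffInv_step A used x hD hne hbx' (fun a ha => (hbx a ha).1) hsz) hbxx hsz2

-- ===== VERDICT (by name: the statement is the Claim_ definition above) =====
theorem greedy_sidon_spec : Claim_equal_greedy_sidon := by
  intro N target_k _
  unfold Spec_greedy_sidon greedy_sidon greedy_sidon_alt
  apply pvLoop_eq target_k N ((N - 1).toNat) 1 [0] _ _ rfl
  · simp
  · intro s
    rw [PySem.Set.mem_ofList]
    simp
  · intro d
    cases d with
    | zero => simp [Array.getD, pvIsDiff]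
    | succ d =>
      rw [pvGetD_ge _ _ (by simp)]
      simp only [Bool.false_eq_true, false_iff, pvIsDiff]
      rintro ⟨a, ha, b, hb, _, heq⟩
      simp at ha hb
      omega
  · intro a ha
    simp at ha; omega
  · simp
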